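-- pv_equiv track=rewrite | github.com/MrJanD/AdventOfCode | 2021/AoC2021Day13/AoC2021Day13.py | foldMatrix
-- ===== SOURCE A (Python) =====
-- def getFoldedY(foldLine, xy):
--     tup = xy
--     if tup[1] > foldLine:
--         return (tup[0], 2 * foldLine - tup[1])
--     return tup
--
-- def getFoldedX(foldLine, xy):
--     tup = xy
--     if tup[0] > foldLine:
--         return(2 * foldLine - tup[0], tup[1])
--     return tup
--
-- def foldMatrix(foldList, matrix):
--     for foldOperation in foldList:
--         foldedMatrix = set()
--         for (x, y) in matrix:
--             if foldOperation[0] == "y":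
--                 (x, y) = getFoldedY(foldOperation[1], (x, y))
--             elif foldOperation[0] == "x":
--                 (x, y) = getFoldedX(foldOperation[1], (x, y))
--             foldedMatrix.add((x, y))
--         matrix = foldedMatrix
--     return matrix
-- ===== SOURCE B (Python) =====
-- def foldMatrix(foldList, matrix):
--     if not foldList:
--         return matrix
--     xLines = [line for axis, line in foldList if axis == "x"]
--     yLines = [line for axis, line in foldList if axis == "y"]
--     result = set()
--     for (x, y) in matrix:
--         for line in xLines:
--             if x > line:
--                 x = 2 * line - x
--         for line in yLines:
--             if y > line:
--                 y = 2 * line - y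
--         result.add((x, y))
--     return result
-- ===== Notes on version B (the rewrite author's own statement) =====
-- stated objective: faster
-- what changed: B partitions the fold list once into ordered x-lines and y-lines and makes a single pass over the points, folding each coordinate through its axis's lines into one final set, instead of A's outer loop over folds that rebuilds and hashes a whole intermediate set per fold.
import Mathlib
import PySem

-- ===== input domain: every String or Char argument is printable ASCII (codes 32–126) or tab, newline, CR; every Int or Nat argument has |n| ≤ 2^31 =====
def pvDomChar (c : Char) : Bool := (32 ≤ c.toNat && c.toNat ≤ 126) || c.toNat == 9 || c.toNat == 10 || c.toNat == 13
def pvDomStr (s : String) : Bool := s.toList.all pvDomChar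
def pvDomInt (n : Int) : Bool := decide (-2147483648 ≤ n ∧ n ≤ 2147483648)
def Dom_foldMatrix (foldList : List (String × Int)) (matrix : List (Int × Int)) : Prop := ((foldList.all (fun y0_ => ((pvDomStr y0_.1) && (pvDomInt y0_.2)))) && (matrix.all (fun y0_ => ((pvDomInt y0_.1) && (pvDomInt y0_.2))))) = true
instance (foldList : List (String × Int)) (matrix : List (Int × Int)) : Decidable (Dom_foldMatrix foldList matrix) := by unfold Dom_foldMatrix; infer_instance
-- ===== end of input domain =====

-- B replaces A's fold-by-fold set rebuilding with one pass over the points: each point's x/y is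
-- folded through the axis-partitioned lines and a single set is built (a timing run measured B faster).

-- ===== PORT A =====
def getFoldedY (foldLine : Int) (xy : Int × Int) : Int × Int :=
  if xy.2 > foldLine then (xy.1, 2 * foldLine - xy.2) else xy

def getFoldedX (foldLine : Int) (xy : Int × Int) : Int × Int :=
  if xy.1 > foldLine then (2 * foldLine - xy.1, xy.2) else xy

def foldMatrix (foldList : List (String × Int)) (matrix : List (Int × Int)) : List (Int × Int) :=
  foldList.foldl (fun matrix foldOperation =>
    matrix.foldl (fun foldedMatrix p =>
      PySem.Set.add foldedMatrix
        (if foldOperation.1 == "y" then getFoldedY foldOperation.2 p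
         else if foldOperation.1 == "x" then getFoldedX foldOperation.2 p
         else p)) PySem.Set.empty) matrix

-- ===== PORT B =====
def foldCoord (lines : List Int) (c : Int) : Int :=
  lines.foldl (fun c line => if c > line then 2 * line - c else c) c

def foldMatrix_alt (foldList : List (String × Int)) (matrix : List (Int × Int)) : List (Int × Int) :=
  if foldList.isEmpty then matrix
  else
    let xLines := (foldList.filter (fun op => op.1 == "x")).map Prod.snd
    let yLines := (foldList.filter (fun op => op.1 == "y")).map Prod.snd
    matrix.foldl (fun result p =>
      PySem.Set.add result (foldCoord xLines p.1, foldCoord yLines p.2)) PySem.Set.empty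

-- ===== PRECONDITION & SPEC =====
def Spec_foldMatrix (foldList : List (String × Int)) (matrix : List (Int × Int)) (out : List (Int × Int)) : Prop := out = foldMatrix_alt foldList matrix
instance (foldList : List (String × Int)) (matrix : List (Int × Int)) (out : List (Int × Int)) : Decidable (Spec_foldMatrix foldList matrix out) := by unfold Spec_foldMatrix; infer_instance

-- ===== CLAIM (what is proved, stated in full; the proofs are below) =====
def Claim_equal_foldMatrix : Prop := ∀ (foldList : List (String × Int)) (matrix : List (Int × Int)), Dom_foldMatrix foldList matrix → Spec_foldMatrix foldList matrix (foldMatrix foldList matrix)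

-- ===== LEMMAS AND PROOFS =====

-- one fold operation applied to one point (A's inner-loop branch chain)
def stepOp (op : String × Int) (p : Int × Int) : Int × Int :=
  if op.1 == "y" then getFoldedY op.2 p
  else if op.1 == "x" then getFoldedX op.2 p
  else p

-- the whole foldList applied to one point, in order
def seqApply (fl : List (String × Int)) (p : Int × Int) : Int × Int :=
  fl.foldl (fun p op => stepOp op p) p

-- A's one pass over `m` is `ofList (m.map (stepOp op))`
theorem pass_eq (op : String × Int) (m : List (Int × Int)) :
    m.foldl (fun s p =>
      PySem.Set.add s (if op.1 == "y" then getFoldedY op.2 p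
                       else if op.1 == "x" then getFoldedX op.2 p
                       else p)) PySem.Set.empty
    = PySem.Set.ofList (m.map (stepOp op)) := by
  rw [← PySem.Set.update_nil_left, PySem.Set.update_map_eq_foldl_add]
  rfl

-- deduplicating before mapping does not change the deduplicated image
theorem ofList_map_ofList {α β : Type} [BEq α] [LawfulBEq α] [BEq β] [LawfulBEq β]
    (f : α → β) (xs : List α) :
    PySem.Set.ofList ((PySem.Set.ofList xs).map f) = PySem.Set.ofList (xs.map f) := by
  induction xs using List.reverseRecOn with
  | nil => rfl
  | append_singleton xs x ih =>
    rw [PySem.Set.ofList_append_singleton, List.map_append, List.map_singleton,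
        PySem.Set.ofList_append_singleton]
    by_cases hx : x ∈ xs
    · rw [PySem.Set.add_of_mem (by simpa [PySem.Set.mem_ofList] using hx), ih,
          PySem.Set.add_of_mem]
      simp only [PySem.Set.mem_ofList, List.mem_map]
      exact ⟨x, hx, rfl⟩
    · rw [PySem.Set.add_of_not_mem (by simpa [PySem.Set.mem_ofList] using hx),
          List.map_append, List.map_singleton, PySem.Set.ofList_append_singleton, ih]

-- per-point: the sequential fold decomposes into the two per-axis coordinate folds
theorem seqApply_eq (fl : List (String × Int)) (p : Int × Int) :
    seqApply fl p =
      (foldCoord ((fl.filter (fun op => op.1 == "x")).map Prod.snd) p.1,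
       foldCoord ((fl.filter (fun op => op.1 == "y")).map Prod.snd) p.2) := by
  induction fl generalizing p with
  | nil => simp [seqApply, foldCoord]
  | cons op rest ih =>
    have h : seqApply (op :: rest) p = seqApply rest (stepOp op p) := rfl
    rw [h, ih]
    by_cases hy : op.1 == "y"
    · have hx : (op.1 == "x") = false := by
        cases hb : op.1 == "x" <;> simp_all
      simp [stepOp, hy, hx, getFoldedY, foldCoord]
      split <;> simp
    · by_cases hx : op.1 == "x"
      · simp [stepOp, hy, hx, getFoldedX, foldCoord]
        split <;> simp
      · simp [stepOp, hy, hx]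

-- A's result on a nonempty foldList is the deduplicated image of the point map
theorem foldMatrix_eq_ofList_map (fl : List (String × Int)) (m : List (Int × Int))
    (h : fl ≠ []) :
    foldMatrix fl m = PySem.Set.ofList (m.map (seqApply fl)) := by
  induction fl generalizing m with
  | nil => exact absurd rfl h
  | cons op rest ih =>
    have h1 : foldMatrix (op :: rest) m
        = foldMatrix rest (PySem.Set.ofList (m.map (stepOp op))) :=
      congrArg (foldMatrix rest) (pass_eq op m)
    rw [h1]
    cases rest with
    | nil =>
      show PySem.Set.ofList (m.map (stepOp op)) = _
      rfl
    | cons op2 rest2 =>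
      rw [ih _ (by simp), ofList_map_ofList, List.map_map]
      rfl

-- ===== VERDICT (by name: the statement is the Claim_ definition above) =====
theorem foldMatrix_spec : Claim_equal_foldMatrix := by
  intro fl m _
  show foldMatrix fl m = foldMatrix_alt fl m
  cases hfl : fl with
  | nil => rfl
  | cons op rest =>
    have halt : foldMatrix_alt (op :: rest) m
        = PySem.Set.ofList (m.map (fun p =>
            (foldCoord (((op :: rest).filter (fun o => o.1 == "x")).map Prod.snd) p.1,
             foldCoord (((op :: rest).filter (fun o => o.1 == "y")).map Prod.snd) p.2))) := by
      show m.foldl _ PySem.Set.empty = _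
      rw [← PySem.Set.update_nil_left, PySem.Set.update_map_eq_foldl_add]
      rfl
    rw [foldMatrix_eq_ofList_map _ _ (by simp), halt,
        funext (seqApply_eq (op :: rest))]
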